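-- pv_equiv track=rewrite | github.com/EurekaAKIRA/Ventus | platform/case-generation/src/case_generation/api_scenario_builder.py | _build_action_for_endpoint
-- ===== SOURCE A (Python) =====
-- def _build_action_for_endpoint(endpoint: dict, actions: list[str]) -> str:
--     method = str(endpoint.get("method", "")).upper()
--     path = str(endpoint.get("path", "")).strip()
--     lowered_method = method.lower()
--     lowered_path = path.lower()
--     path_segments = [segment for segment in lowered_path.split("/") if segment]
--
--     for action in actions:
--         lowered_action = action.lower()
--         if lowered_method and lowered_method in lowered_action and lowered_path and lowered_path in lowered_action:
--             return action
--
--     for action in actions: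
--         lowered_action = action.lower()
--         if lowered_method and lowered_method in lowered_action:
--             if any(segment in lowered_action for segment in path_segments):
--                 return action
--
--     has_path_match = False
--     for action in actions:
--         lowered_action = action.lower()
--         if lowered_path and lowered_path in lowered_action:
--             has_path_match = True
--             break
--     if has_path_match and method and path:
--         # Avoid mapping GET endpoint to a PUT action when path is shared.
--         return f"调用 {method} {path}"
--
--     for action in actions:
--         lowered_action = action.lower()
--         if any(segment in lowered_action for segment in path_segments):
--             return action
--
--     if method and path:
--         return f"调用 {method} {path}"
--     if path:
--         return f"调用接口 {path}"
--     return actions[0] if actions else "执行核心业务动作"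
-- ===== SOURCE B (Python) =====
-- def _build_action_for_endpoint(endpoint: dict, actions: list[str]) -> str:
--     method = str(endpoint.get("method", "")).upper()
--     path = str(endpoint.get("path", "")).strip()
--     lm = method.lower()
--     lp = path.lower()
--     segments = [s for s in lp.split("/") if s]
--
--     # single pass: record the first hit of each tier independently
--     t1 = t2 = t4 = None
--     has_path_match = False
--     for action in actions:
--         la = action.lower()
--         if t1 is None and lm and lm in la and lp and lp in la:
--             t1 = action
--         if t2 is None and lm and lm in la and any(s in la for s in segments):
--             t2 = action
--         if lp and lp in la:
--             has_path_match = True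
--         if t4 is None and any(s in la for s in segments):
--             t4 = action
--
--     if t1 is not None:
--         return t1
--     if t2 is not None:
--         return t2
--     if has_path_match and method and path:
--         return f"调用 {method} {path}"
--     if t4 is not None:
--         return t4
--     if method and path:
--         return f"调用 {method} {path}"
--     if path:
--         return f"调用接口 {path}"
--     return actions[0] if actions else "执行核心业务动作"
-- ===== Notes on version B (the rewrite author's own statement) =====
-- stated objective: alternative
-- what changed: B replaces A's four separate scans over actions (tier-1, tier-2, path-match probe, tier-4) with one single pass that lowers each action once and records the first hit of each tier independently, then applies the same priority/fallback selection after the loop.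
import Mathlib
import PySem

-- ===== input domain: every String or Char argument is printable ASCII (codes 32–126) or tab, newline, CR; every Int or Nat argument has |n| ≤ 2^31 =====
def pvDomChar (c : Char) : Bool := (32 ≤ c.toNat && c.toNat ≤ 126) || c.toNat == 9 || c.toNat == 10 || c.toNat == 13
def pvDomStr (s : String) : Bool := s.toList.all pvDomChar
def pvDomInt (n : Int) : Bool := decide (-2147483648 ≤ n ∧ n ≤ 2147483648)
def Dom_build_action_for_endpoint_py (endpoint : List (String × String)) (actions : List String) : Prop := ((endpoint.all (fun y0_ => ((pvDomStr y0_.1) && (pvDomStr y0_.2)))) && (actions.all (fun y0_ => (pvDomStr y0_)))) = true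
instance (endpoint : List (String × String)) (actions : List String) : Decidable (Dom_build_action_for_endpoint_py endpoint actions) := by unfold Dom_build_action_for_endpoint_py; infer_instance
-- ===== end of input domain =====

-- B replaces A's four separate scans over `actions` with one single pass recording the
-- first hit of each tier independently; same return value (objective: alternative).

-- ===== PORT A =====
-- first loop: first action whose lowering contains both the method and the full path
def pvA_loop1 (lm lp : String) : List String → Option String
  | [] => none
  | a :: rest =>
    let la := PySem.Str.lower a
    if (lm != "") && PySem.Str.isIn lm la && (lp != "") && PySem.Str.isIn lp la then some a
    else pvA_loop1 lm lp rest

-- second loop: first action whose lowering contains the method and some path segment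
def pvA_loop2 (lm : String) (segs : List String) : List String → Option String
  | [] => none
  | a :: rest =>
    let la := PySem.Str.lower a
    if (lm != "") && PySem.Str.isIn lm la then
      if segs.any (fun s => PySem.Str.isIn s la) then some a
      else pvA_loop2 lm segs rest
    else pvA_loop2 lm segs rest

-- third loop: does any action's lowering contain the full path? (break → Bool)
def pvA_loop3 (lp : String) : List String → Bool
  | [] => false
  | a :: rest =>
    let la := PySem.Str.lower a
    if (lp != "") && PySem.Str.isIn lp la then true
    else pvA_loop3 lp rest

-- fourth loop: first action whose lowering contains some path segment
def pvA_loop4 (segs : List String) : List String → Option String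
  | [] => none
  | a :: rest =>
    let la := PySem.Str.lower a
    if segs.any (fun s => PySem.Str.isIn s la) then some a
    else pvA_loop4 segs rest

def build_action_for_endpoint_py (endpoint : List (String × String)) (actions : List String) : String :=
  let method := PySem.Str.upper ((PySem.Dict.ofList endpoint).getD "method" "")
  let path := PySem.Str.strip ((PySem.Dict.ofList endpoint).getD "path" "")
  let lm := PySem.Str.lower method
  let lp := PySem.Str.lower path
  -- "/" is a nonempty separator, so split? is always `some`; getD [] is exact here
  let segs := ((PySem.Str.split? lp "/").getD []).filter (fun s => s != "")
  match pvA_loop1 lm lp actions with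
  | some a => a
  | none =>
    match pvA_loop2 lm segs actions with
    | some a => a
    | none =>
      if pvA_loop3 lp actions && (method != "") && (path != "") then
        "调用 " ++ method ++ " " ++ path
      else
        match pvA_loop4 segs actions with
        | some a => a
        | none =>
          if (method != "") && (path != "") then "调用 " ++ method ++ " " ++ path
          else if path != "" then "调用接口 " ++ path
          else match actions with
               | a :: _ => a
               | [] => "执行核心业务动作"

-- ===== PORT B =====
-- one step of the single pass: lower the action once, update each tier's first hit
def pvB_step (lm lp : String) (segs : List String)
    (st : Option String × Option String × Bool × Option String) (a : String) :
    Option String × Option String × Bool × Option String :=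
  let la := PySem.Str.lower a
  let t1 := match st.1 with
            | some x => some x
            | none =>
              if (lm != "") && PySem.Str.isIn lm la && (lp != "") && PySem.Str.isIn lp la
              then some a else none
  let t2 := match st.2.1 with
            | some x => some x
            | none =>
              if (lm != "") && PySem.Str.isIn lm la && segs.any (fun s => PySem.Str.isIn s la)
              then some a else none
  let hp := st.2.2.1 || ((lp != "") && PySem.Str.isIn lp la)
  let t4 := match st.2.2.2 with
            | some x => some x
            | none => if segs.any (fun s => PySem.Str.isIn s la) then some a else none
  (t1, t2, hp, t4)

def build_action_for_endpoint_py_alt (endpoint : List (String × String)) (actions : List String) : String :=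
  let method := PySem.Str.upper ((PySem.Dict.ofList endpoint).getD "method" "")
  let path := PySem.Str.strip ((PySem.Dict.ofList endpoint).getD "path" "")
  let lm := PySem.Str.lower method
  let lp := PySem.Str.lower path
  -- "/" is a nonempty separator, so split? is always `some`; getD [] is exact here
  let segs := ((PySem.Str.split? lp "/").getD []).filter (fun s => s != "")
  let st := actions.foldl (pvB_step lm lp segs) (none, none, false, none)
  match st.1 with
  | some a => a
  | none =>
    match st.2.1 with
    | some a => a
    | none =>
      if st.2.2.1 && (method != "") && (path != "") then
        "调用 " ++ method ++ " " ++ path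
      else
        match st.2.2.2 with
        | some a => a
        | none =>
          if (method != "") && (path != "") then "调用 " ++ method ++ " " ++ path
          else if path != "" then "调用接口 " ++ path
          else match actions with
               | a :: _ => a
               | [] => "执行核心业务动作"

-- ===== PRECONDITION & SPEC =====
def Spec_build_action_for_endpoint_py (endpoint : List (String × String)) (actions : List String) (out : String) : Prop := out = build_action_for_endpoint_py_alt endpoint actions
instance (endpoint : List (String × String)) (actions : List String) (out : String) : Decidable (Spec_build_action_for_endpoint_py endpoint actions out) := by unfold Spec_build_action_for_endpoint_py; infer_instance

-- ===== CLAIM (what is proved, stated in full; the proofs are below) =====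
def Claim_equal_build_action_for_endpoint_py : Prop := ∀ (endpoint : List (String × String)) (actions : List String), Dom_build_action_for_endpoint_py endpoint actions → Spec_build_action_for_endpoint_py endpoint actions (build_action_for_endpoint_py endpoint actions)

-- ===== LEMMAS AND PROOFS =====

-- proof-only helper: `x <|> y` on options, as an explicit match (first-hit keeps priority)
def pvOr (x y : Option String) : Option String :=
  match x with
  | some a => some a
  | none => y

-- the single pass computes exactly the four first-match scans of A
theorem pvB_fold_eq (lm lp : String) (segs : List String) (l : List String)
    (t1 t2 : Option String) (hp : Bool) (t4 : Option String) :
    l.foldl (pvB_step lm lp segs) (t1, t2, hp, t4) =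
      (pvOr t1 (pvA_loop1 lm lp l), pvOr t2 (pvA_loop2 lm segs l),
       hp || pvA_loop3 lp l, pvOr t4 (pvA_loop4 segs l)) := by
  induction l generalizing t1 t2 hp t4 with
  | nil =>
    cases t1 <;> cases t2 <;> cases t4 <;>
      simp [pvA_loop1, pvA_loop2, pvA_loop3, pvA_loop4, pvOr]
  | cons a rest ih =>
    rw [List.foldl_cons, ih]
    simp only [pvB_step, Prod.mk.injEq]
    refine ⟨?_, ?_, ?_, ?_⟩
    · cases t1 with
      | some x => simp [pvOr]
      | none =>
        by_cases h1 : lm = "" <;>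
          by_cases h2 : PySem.Chars.isIn lm.toList (PySem.Chars.lower a.toList) = true <;>
            by_cases h3 : lp = "" <;>
              by_cases h4 : PySem.Chars.isIn lp.toList (PySem.Chars.lower a.toList) = true <;>
                simp [pvA_loop1, pvOr, h1, h2, h3, h4]
    · cases t2 with
      | some x => simp [pvOr]
      | none =>
        by_cases h1 : lm = "" <;>
          by_cases h2 : PySem.Chars.isIn lm.toList (PySem.Chars.lower a.toList) = true <;>
            by_cases hS : ∃ x ∈ segs, PySem.Chars.isIn x.toList (PySem.Chars.lower a.toList) = true <;>
              simp [pvA_loop2, pvOr, h1, h2, hS]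
    · by_cases h3 : lp = "" <;>
        by_cases h4 : PySem.Chars.isIn lp.toList (PySem.Chars.lower a.toList) = true <;>
          simp [pvA_loop3, h3, h4, Bool.or_assoc]
    · cases t4 with
      | some x => simp [pvOr]
      | none =>
        by_cases hS : ∃ x ∈ segs, PySem.Chars.isIn x.toList (PySem.Chars.lower a.toList) = true <;>
          simp [pvA_loop4, pvOr, hS]

-- ===== VERDICT (by name: the statement is the Claim_ definition above) =====
theorem build_action_for_endpoint_py_spec : Claim_equal_build_action_for_endpoint_py := by
  intro endpoint actions _
  unfold Spec_build_action_for_endpoint_py build_action_for_endpoint_py build_action_for_endpoint_py_alt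
  simp only [pvB_fold_eq, pvOr, Bool.false_or]
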